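-- pv_equiv track=rewrite | github.com/soheeeeP/Algorithm | src/programmers/2018 KAKAO BLIND RECRUITMENT/비밀지도.py | solution
-- ===== SOURCE A (Python) =====
-- def solution(n, arr1, arr2):
--     answer = []
--     maze1, maze2 = [], []
--     map = {1: "#", 0: ' '}
--     format_len = "%0"+str(n)+"d"
--
--     for i in range(n):
--         maze1.append(format_len % int(format(arr1[i], 'b')))
--         maze2.append(format_len % int(format(arr2[i], 'b')))
--
--     for x in range(n):
--         data = ''
--         for y in range(n):
--             data += map[int(maze1[x][y]) or int(maze2[x][y])]
--         answer.append(data)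
--
--     return answer
-- ===== SOURCE B (Python) =====
-- def solution(n, arr1, arr2):
--     tr = str.maketrans('10', '# ')
--     return [format(arr1[i] | arr2[i], '0%db' % n).translate(tr) for i in range(n)]
-- ===== Notes on version B (the rewrite author's own statement) =====
-- stated objective: idiomatic
-- what changed: B replaces A's two padded-string mazes, the binary->decimal int() round trip, the {0,1}->char dict and the nested per-character loop with one integer bitwise OR per row rendered once as an n-wide binary string and translated '1'/'0' -> '#'/' ' in a single pass; Pre_ excludes inputs where A raises (rows missing, or a negative row whose '-' reaches int()) and rows >= 2^n, whose binary rendering is wider than n so A's accidental leading-n-character read and B's full-width row are both unspecified.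
-- outside the precondition, e.g. on solution(1, [2], [0]): A returns ['#'], B returns ['# ']; on solution(1, [1], [-1]): A returns ['#'], B returns ['-#']; on solution(2, [0, 3], [-1, -1]): A raises ValueError, B returns ['-#', '-#']
import Mathlib
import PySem

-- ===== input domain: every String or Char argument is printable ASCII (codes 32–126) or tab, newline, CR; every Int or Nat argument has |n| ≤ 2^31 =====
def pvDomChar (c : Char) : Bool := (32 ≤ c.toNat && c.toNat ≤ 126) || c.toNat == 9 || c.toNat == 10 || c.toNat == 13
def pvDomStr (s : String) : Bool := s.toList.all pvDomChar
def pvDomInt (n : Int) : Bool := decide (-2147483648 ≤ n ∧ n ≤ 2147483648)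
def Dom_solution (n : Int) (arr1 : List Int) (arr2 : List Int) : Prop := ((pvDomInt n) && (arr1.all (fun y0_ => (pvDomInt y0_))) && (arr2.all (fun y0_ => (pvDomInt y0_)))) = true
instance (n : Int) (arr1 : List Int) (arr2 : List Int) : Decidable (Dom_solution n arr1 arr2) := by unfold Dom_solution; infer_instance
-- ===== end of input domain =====

-- B combines each pair of rows with one integer bitwise OR and renders it once as an
-- n-wide binary string translated to '#'/' ' (idiomatic), instead of A's two padded
-- string mazes and nested per-character loop.


-- ===== PORT A =====
-- Python's int(s) is only ever applied by A, inside Pre_, to pure decimal-digit strings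
-- (the binary rendering of a nonnegative int, and single '0'/'1' characters); pyDigitsInt
-- is int(s) exactly on such all-digit strings.
def pyDigitsInt (cs : List Char) : Int := cs.foldl (fun a c => 10 * a + ((c.toNat : Int) - 48)) 0

def solution (n : Int) (arr1 : List Int) (arr2 : List Int) : List String :=
  -- map = {1: "#", 0: ' '}
  let mp : PySem.Dict Int String := (PySem.Dict.empty.insert 1 "#").insert 0 " "
  -- format_len = "%0" + str(n) + "d"; '%0<n>d' % d left-pads str(d) with '0' to width n
  let fmt : Int → String := fun d => PySem.Str.zfill (PySem.Int.toStr d) n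
  -- first loop: maze1.append(format_len % int(format(arr1[i], 'b'))), same for maze2
  let maze1 := (PySem.List.pyRange 0 n 1).map (fun i =>
    fmt (pyDigitsInt (PySem.Int.toBin (PySem.List.pyGetD arr1 i 0)).toList))
  let maze2 := (PySem.List.pyRange 0 n 1).map (fun i =>
    fmt (pyDigitsInt (PySem.Int.toBin (PySem.List.pyGetD arr2 i 0)).toList))
  -- second loop: data += map[int(maze1[x][y]) or int(maze2[x][y])]
  (PySem.List.pyRange 0 n 1).map (fun x =>
    (PySem.List.pyRange 0 n 1).foldl (fun data y =>
      let d1 := pyDigitsInt [(PySem.Str.pyGet? (PySem.List.pyGetD maze1 x "") y).getD '0']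
      let d2 := pyDigitsInt [(PySem.Str.pyGet? (PySem.List.pyGetD maze2 x "") y).getD '0']
      data ++ mp.getD (if d1 ≠ 0 then d1 else d2) "") "")

-- ===== PORT B =====
def solution_alt (n : Int) (arr1 : List Int) (arr2 : List Int) : List String :=
  -- [format(arr1[i] | arr2[i], '0%db' % n).translate({'1'->'#', '0'->' '}) for i in range(n)]
  -- format(x, '0<n>b') = the binary rendering of x zero-padded (after the sign) to width n
  (PySem.List.pyRange 0 n 1).map (fun i =>
    let x := PySem.Int.bor (PySem.List.pyGetD arr1 i 0) (PySem.List.pyGetD arr2 i 0)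
    (PySem.Str.zfill (PySem.Int.toBin x) n).map
      (fun c => if c = '1' then '#' else if c = '0' then ' ' else c))

-- ===== PRECONDITION & SPEC =====
-- Pre_ keeps the puzzle's natural domain (n rows present, each an n-bit nonnegative value):
-- outside it A raises (IndexError on a missing row; ValueError when the '-' of a negative
-- entry reaches int()) or, on a negative masked by the short-circuit 'or' or a row ≥ 2^n
-- whose binary rendering is wider than n, returns a value (leading n characters only) that
-- no specification would pick, and B's full-width value there is equally unspecified.
def Pre_solution (n : Int) (arr1 : List Int) (arr2 : List Int) : Prop :=
  0 < n → (n ≤ (arr1.length : Int) ∧ n ≤ (arr2.length : Int) ∧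
    (∀ v ∈ arr1.take n.toNat, 0 ≤ v ∧ v < 2 ^ n.toNat) ∧
    (∀ v ∈ arr2.take n.toNat, 0 ≤ v ∧ v < 2 ^ n.toNat))
instance (n : Int) (arr1 : List Int) (arr2 : List Int) : Decidable (Pre_solution n arr1 arr2) := by
  unfold Pre_solution; infer_instance

def pvWitness_solution : Int × List Int × List Int := (2, [1, 2], [2, 1])

def Spec_solution (n : Int) (arr1 : List Int) (arr2 : List Int) (out : List String) : Prop := out = solution_alt n arr1 arr2
instance (n : Int) (arr1 : List Int) (arr2 : List Int) (out : List String) : Decidable (Spec_solution n arr1 arr2 out) := by unfold Spec_solution; infer_instance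

-- ===== CLAIM (what is proved, stated in full; the proofs are below) =====
def Claim_equal_solution : Prop := ∀ (n : Int) (arr1 : List Int) (arr2 : List Int), Dom_solution n arr1 arr2 → Pre_solution n arr1 arr2 → Spec_solution n arr1 arr2 (solution n arr1 arr2)

-- ===== LEMMAS AND PROOFS =====

-- the decimal number whose digits are the binary digits of m
def decVal (m : Nat) : Nat :=
  if m < 2 then m else 10 * decVal (m / 2) + m % 2
decreasing_by exact Nat.div_lt_self (by omega) (by omega)

lemma decVal_pos {m : Nat} (hm : 0 < m) : 0 < decVal m := by
  induction m using Nat.strong_induction_on with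
  | _ m ih =>
    rw [decVal]
    split
    · omega
    · next h =>
      have := ih (m / 2) (by omega) (by omega)
      omega

lemma pyDigitsInt_append (cs : List Char) (c : Char) :
    pyDigitsInt (cs ++ [c]) = 10 * pyDigitsInt cs + ((c.toNat : Int) - 48) := by
  simp [pyDigitsInt, List.foldl_append]

lemma pyDigitsInt_toDigits_two (m : Nat) :
    pyDigitsInt (Nat.toDigits 2 m) = (decVal m : Int) := by
  induction m using Nat.strong_induction_on with
  | _ m ih =>
    by_cases h2 : m < 2
    · rw [Nat.toDigits_of_lt_base h2, decVal]
      interval_cases m <;> simp [pyDigitsInt, Nat.digitChar]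
    · rw [Nat.toDigits_of_base_le (by norm_num) (by omega), pyDigitsInt_append,
        ih (m / 2) (by omega)]
      conv_rhs => rw [decVal]
      rw [if_neg h2]
      have hmod : m % 2 = 0 ∨ m % 2 = 1 := Nat.mod_two_eq_zero_or_one m
      rcases hmod with h | h <;> rw [h] <;> simp [Nat.digitChar]

lemma toDigits_ten_decVal (m : Nat) :
    Nat.toDigits 10 (decVal m) = Nat.toDigits 2 m := by
  induction m using Nat.strong_induction_on with
  | _ m ih =>
    by_cases h2 : m < 2
    · rw [decVal, if_pos h2, Nat.toDigits_of_lt_base h2, Nat.toDigits_of_lt_base (by omega)]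
    · have hpos : 0 < decVal (m / 2) := decVal_pos (by omega)
      rw [decVal, if_neg h2,
        Nat.toDigits_of_base_le (b := 10) (by norm_num) (by omega),
        Nat.toDigits_of_base_le (b := 2) (by norm_num) (by omega)]
      have hdiv : (10 * decVal (m / 2) + m % 2) / 10 = decVal (m / 2) := by omega
      have hmod : (10 * decVal (m / 2) + m % 2) % 10 = m % 2 := by omega
      rw [hdiv, hmod, ih (m / 2) (by omega)]

-- binary rendering, bit by bit
lemma toDigits_two_eq_map (m : Nat) (hm : m ≠ 0) :
    Nat.toDigits 2 m = (List.range (Nat.toDigits 2 m).length).map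
      (fun y => if m.testBit ((Nat.toDigits 2 m).length - 1 - y) then '1' else '0') := by
  induction m using Nat.strong_induction_on with
  | _ m ih =>
    by_cases h2 : m < 2
    · have : m = 1 := by omega
      subst this; decide
    · have hstep : Nat.toDigits 2 m = Nat.toDigits 2 (m / 2) ++ [(m % 2).digitChar] :=
        Nat.toDigits_of_base_le (by norm_num) (by omega)
      rw [hstep]
      simp only [List.length_append, List.length_singleton]
      rw [List.range_succ, List.map_append, List.map_singleton]
      congr 1
      · conv_lhs => rw [ih (m / 2) (by omega) (by omega)]
        apply List.map_congr_left
        intro y hy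
        rw [List.mem_range] at hy
        have h1 : (Nat.toDigits 2 (m / 2)).length + 1 - 1 - y
            = ((Nat.toDigits 2 (m / 2)).length - 1 - y) + 1 := by omega
        rw [h1, Nat.testBit_add_one]
      · have h0 : (Nat.toDigits 2 (m / 2)).length + 1 - 1 - (Nat.toDigits 2 (m / 2)).length
            = 0 := by omega
        rw [h0, Nat.testBit_zero]
        have hmod : m % 2 = 0 ∨ m % 2 = 1 := Nat.mod_two_eq_zero_or_one m
        rcases hmod with h | h <;> simp [h, Nat.digitChar]

lemma zfill_digits (cs : List Char) (w : Int) (hne : cs ≠ [])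
    (hd : (cs.head hne).isDigit = true) :
    PySem.Chars.zfill cs w = List.replicate (w.toNat - cs.length) '0' ++ cs := by
  unfold PySem.Chars.zfill
  cases cs with
  | nil => exact absurd rfl hne
  | cons c rest =>
    have hc : ¬(c = '+' ∨ c = '-') := by
      rintro (rfl | rfl) <;> simp [List.head] at hd
    split
    · next h =>
      have h0 : w.toNat - (c :: rest).length = 0 := by
        simp only [List.length_cons] at h ⊢; omega
      rw [h0, List.replicate_zero, List.nil_append]
    · dsimp only
      rw [if_neg hc]

-- zero-padding the binary rendering of m < 2^N to width N, bit by bit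
lemma zfill_toDigits_two (m N : Nat) (hN : 0 < N) (hm : m < 2 ^ N) :
    PySem.Chars.zfill (Nat.toDigits 2 m) (N : Int) =
      (List.range N).map (fun y => if m.testBit (N - 1 - y) then '1' else '0') := by
  have hne : Nat.toDigits 2 m ≠ [] := by
    intro h
    have := Nat.length_toDigits_pos (b := 2) (n := m)
    rw [h] at this
    simp at this
  have hd : ((Nat.toDigits 2 m).head hne).isDigit = true :=
    Nat.isDigit_of_mem_toDigits (by norm_num) (by norm_num) (List.head_mem hne)
  rw [zfill_digits _ _ hne hd]
  have htn : ((N : Nat) : Int).toNat = N := Int.toNat_natCast N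
  rw [htn]
  by_cases hm0 : m = 0
  · subst hm0
    rw [Nat.toDigits_zero]
    simp only [List.length_singleton]
    have hrep : (List.range N).map
        (fun y => if Nat.testBit 0 (N - 1 - y) then '1' else '0') = List.replicate N '0' := by
      apply List.eq_replicate_iff.mpr
      constructor
      · simp
      · intro b hb
        simp only [List.mem_map] at hb
        obtain ⟨y, _, rfl⟩ := hb
        simp [Nat.zero_testBit]
    rw [hrep]
    have hN1 : N - 1 + 1 = N := by omega
    calc List.replicate (N - 1) '0' ++ ['0'] = List.replicate ((N - 1) + 1) '0' :=
          List.replicate_succ'.symm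
    _ = List.replicate N '0' := by rw [hN1]
  · set L := (Nat.toDigits 2 m).length with hL
    have hLpos : 0 < L := Nat.length_toDigits_pos
    have hLN : L ≤ N := (Nat.length_toDigits_le_iff (by norm_num) hN).mpr hm
    have hsum : N = (N - L) + L := by omega
    conv_rhs => rw [hsum]
    rw [List.range_add, List.map_append, List.map_map]
    congr 1
    · symm
      apply List.eq_replicate_iff.mpr
      constructor
      · simp
      · intro b hb
        simp only [List.mem_map, List.mem_range] at hb
        obtain ⟨y, hy, rfl⟩ := hb
        have hmL : m < 2 ^ L := (Nat.length_toDigits_le_iff (by norm_num) hLpos).mp le_rfl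
        have hbit : m.testBit ((N - L) + L - 1 - y) = false := by
          apply Nat.testBit_lt_two_pow
          exact lt_of_lt_of_le hmL (Nat.pow_le_pow_right (by norm_num) (by omega))
        rw [hbit]
        simp
    · conv_lhs => rw [toDigits_two_eq_map m hm0]
      apply List.map_congr_left
      intro y hy
      rw [List.mem_range] at hy
      simp only [Function.comp_apply]
      have hidx : (N - L) + L - 1 - ((N - L) + y) = L - 1 - y := by omega
      rw [hidx]

-- string foldl-append to flatMap
lemma strFoldl_toList {α : Type} (l : List α) (g : α → String) (init : String) :
    (l.foldl (fun data y => data ++ g y) init).toList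
      = init.toList ++ l.flatMap (fun y => (g y).toList) := by
  induction l generalizing init with
  | nil => simp
  | cons y l ih => simp [ih, String.toList_append]

lemma flatMap_eq_map_of_singleton {α β : Type} (l : List α) (g : α → List β) (c : α → β)
    (h : ∀ y ∈ l, g y = [c y]) : l.flatMap g = l.map c := by
  induction l with
  | nil => rfl
  | cons y l ih =>
    rw [List.flatMap_cons, List.map_cons, h y (by simp), ih (fun z hz => h z (by simp [hz]))]
    rfl

lemma pyDigitsInt_bitChar (b : Bool) :
    pyDigitsInt [if b then '1' else '0'] = if b then 1 else 0 := by
  cases b <;> decide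

lemma dict_char (b1 b2 : Bool) :
    (((PySem.Dict.empty.insert (1 : Int) "#").insert 0 " ").getD
      (if (if b1 then (1 : Int) else 0) ≠ 0 then (if b1 then (1 : Int) else 0)
       else (if b2 then (1 : Int) else 0)) "") = if b1 || b2 then "#" else " " := by
  cases b1 <;> cases b2 <;> decide

-- A's maze entry for an n-bit value, character by character
lemma entry_char (N : Nat) (hN : 0 < N) (m : Nat) (hm : m < 2 ^ N) (y : Nat) (hy : y < N) :
    (PySem.Str.pyGet? (PySem.Str.zfill (PySem.Int.toStr
        (pyDigitsInt (PySem.Int.toBin (m : Int)).toList)) ((N : Nat) : Int)) ((y : Nat) : Int)).getD '0'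
      = if m.testBit (N - 1 - y) then '1' else '0' := by
  have htl : (PySem.Int.toBin (m : Int)).toList = Nat.toDigits 2 m := by
    rw [PySem.Int.toList_toBin]
    simp [PySem.Int.toBinChars]
  rw [htl, pyDigitsInt_toDigits_two]
  have hstr : (PySem.Str.zfill (PySem.Int.toStr ((decVal m : Nat) : Int)) ((N : Nat) : Int)).toList
      = (List.range N).map (fun y => if m.testBit (N - 1 - y) then '1' else '0') := by
    rw [PySem.Str.toList_zfill, PySem.Int.toList_toStr]
    have hch : PySem.Int.toChars ((decVal m : Nat) : Int) = Nat.toDigits 10 (decVal m) := by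
      simp [PySem.Int.toChars]
    rw [hch, toDigits_ten_decVal, zfill_toDigits_two m N hN hm]
  rw [PySem.Str.pyGet?, PySem.Chars.pyGet?, hstr, PySem.List.pyGet?_natCast]
  rw [List.getElem?_map, List.getElem?_range hy]
  rfl

-- A's inner loop for one pair of n-bit rows equals B's row
lemma row_eq (N : Nat) (hN : 0 < N) (v1 v2 : Int)
    (hv1 : 0 ≤ v1 ∧ v1 < 2 ^ N) (hv2 : 0 ≤ v2 ∧ v2 < 2 ^ N) :
    (PySem.List.pyRange 0 ((N : Nat) : Int) 1).foldl (fun data y =>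
        data ++ (((PySem.Dict.empty.insert (1 : Int) "#").insert 0 " ").getD
          (if pyDigitsInt [(PySem.Str.pyGet? (PySem.Str.zfill (PySem.Int.toStr
                (pyDigitsInt (PySem.Int.toBin v1).toList)) ((N : Nat) : Int)) y).getD '0'] ≠ 0
           then pyDigitsInt [(PySem.Str.pyGet? (PySem.Str.zfill (PySem.Int.toStr
                (pyDigitsInt (PySem.Int.toBin v1).toList)) ((N : Nat) : Int)) y).getD '0']
           else pyDigitsInt [(PySem.Str.pyGet? (PySem.Str.zfill (PySem.Int.toStr
                (pyDigitsInt (PySem.Int.toBin v2).toList)) ((N : Nat) : Int)) y).getD '0']) "")) ""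
      = String.map (fun c => if c = '1' then '#' else if c = '0' then ' ' else c)
          (PySem.Str.zfill (PySem.Int.toBin (PySem.Int.bor v1 v2)) ((N : Nat) : Int)) := by
  obtain ⟨m1, rfl⟩ : ∃ m : Nat, v1 = (m : Int) := ⟨v1.toNat, (Int.toNat_of_nonneg hv1.1).symm⟩
  obtain ⟨m2, rfl⟩ : ∃ m : Nat, v2 = (m : Int) := ⟨v2.toNat, (Int.toNat_of_nonneg hv2.1).symm⟩
  have hm1 : m1 < 2 ^ N := by exact_mod_cast hv1.2
  have hm2 : m2 < 2 ^ N := by exact_mod_cast hv2.2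
  set x : Nat := m1 ||| m2 with hx
  apply String.toList_inj.mp
  -- left side: fold over range N, one character per step
  rw [PySem.List.pyRange_zero_natCast, List.foldl_map, strFoldl_toList]
  rw [flatMap_eq_map_of_singleton _ _
      (fun y => if x.testBit (N - 1 - y) then '#' else ' ') ?singles]
  case singles =>
    intro y hy
    rw [List.mem_range] at hy
    rw [entry_char N hN m1 hm1 y hy, entry_char N hN m2 hm2 y hy,
        pyDigitsInt_bitChar, pyDigitsInt_bitChar, dict_char]
    simp only [hx, Nat.testBit_or]
    cases h1 : m1.testBit (N - 1 - y) <;> cases h2 : m2.testBit (N - 1 - y) <;> rfl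
  -- right side
  rw [PySem.Int.bor_natCast, ← hx]
  have hxN : x < 2 ^ N := Nat.or_lt_two_pow hm1 hm2
  have htlx : (PySem.Int.toBin ((x : Nat) : Int)).toList = Nat.toDigits 2 x := by
    rw [PySem.Int.toList_toBin]
    simp [PySem.Int.toBinChars]
  rw [String.toList_map, PySem.Str.toList_zfill, htlx, zfill_toDigits_two x N hN hxN]
  rw [List.map_map]
  apply List.map_congr_left
  intro y hy
  cases hb : x.testBit (N - 1 - y) <;> simp [hb]

lemma val_bounded (arr : List Int) (N : Nat) (x : Int) (hx0 : 0 ≤ x) (hxN : x < ((N : Nat) : Int))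
    (hlen : ((N : Nat) : Int) ≤ (arr.length : Int))
    (h : ∀ v ∈ arr.take N, 0 ≤ v ∧ v < 2 ^ N) :
    0 ≤ PySem.List.pyGetD arr x 0 ∧ PySem.List.pyGetD arr x 0 < 2 ^ N := by
  have hx : x.toNat < arr.length := by omega
  rw [PySem.List.pyGetD_eq_getElem arr 0 hx0 (by omega)]
  apply h
  have hxn : x.toNat < N := by omega
  have : (arr.take N)[x.toNat]'(by simp; omega) = arr[x.toNat] := List.getElem_take
  exact this ▸ List.getElem_mem _

-- ===== VERDICT (by name: the statement is the Claim_ definition above) =====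
theorem solution_spec : Claim_equal_solution := by
  unfold Claim_equal_solution
  intro n arr1 arr2 _ hpre
  unfold Spec_solution solution solution_alt
  by_cases hn : 0 < n
  · obtain ⟨h1, h2, h3, h4⟩ := hpre hn
    obtain ⟨N, rfl⟩ : ∃ N : Nat, n = (N : Int) := ⟨n.toNat, (Int.toNat_of_nonneg (by omega)).symm⟩
    have hN : 0 < N := by exact_mod_cast hn
    simp only [Int.toNat_natCast] at h3 h4
    apply List.map_congr_left
    intro k hk
    rw [PySem.List.mem_pyRange_one] at hk
    obtain ⟨hk0, hkN⟩ := hk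
    rw [PySem.List.pyGetD_map_pyRange_of_nonneg _ _ _ _ hk0 hkN,
        PySem.List.pyGetD_map_pyRange_of_nonneg _ _ _ _ hk0 hkN]
    exact row_eq N hN _ _ (val_bounded arr1 N k hk0 hkN h1 h3) (val_bounded arr2 N k hk0 hkN h2 h4)
  · have hr : PySem.List.pyRange 0 n 1 = [] := by
      unfold PySem.List.pyRange
      rw [if_neg one_ne_zero]
      simp only [zero_lt_one, if_true, if_neg (by omega : ¬ (0 : Int) < n)]
      rfl
    rw [hr]
    rfl
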